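-- pv_equiv track=rewrite | github.com/jungokasai/graph_parser | analysis/utils/analyzer.py | dep_length
-- ===== SOURCE A (Python) =====
-- def dep_length(gold_arcs, gold_rels, predicted_arcs, predicted_rels):
--     rec_correct = {}
--     rec_total = {}
--     prec_correct = {}
--     prec_total = {}
--     for sent_idx in range(len(gold_arcs)):
--         gold_arcs_sent = gold_arcs[sent_idx]
--         gold_rels_sent = gold_rels[sent_idx]
--         predicted_arcs_sent = predicted_arcs[sent_idx]
--         predicted_rels_sent = predicted_rels[sent_idx]
--         for word_idx in range(len(gold_arcs_sent)):
--             gold_arc = int(gold_arcs_sent[word_idx])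
--             gold_rel = gold_rels_sent[word_idx]
--             predicted_rel = predicted_rels_sent[word_idx]
--             predicted_arc = int(predicted_arcs_sent[word_idx])
--             rec_distance = abs((word_idx+1)-gold_arc)
--             prec_distance = abs((word_idx+1)-predicted_arc)
--             if rec_distance in rec_correct.keys():
--                 rec_total[rec_distance] += 1
--                 if gold_arc == predicted_arc:
--                     rec_correct[rec_distance] += 1
--             else:
--                 rec_total[rec_distance] = 1
--                 rec_correct[rec_distance] = 0
--                 if gold_arc == predicted_arc:
--                     rec_correct[rec_distance] += 1
--             if prec_distance in prec_correct.keys():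
--                 prec_total[prec_distance] += 1
--                 if gold_arc == predicted_arc:
--                     prec_correct[prec_distance] += 1
--             else:
--                 prec_total[prec_distance] = 1
--                 prec_correct[prec_distance] = 0
--                 if gold_arc == predicted_arc:
--                     prec_correct[prec_distance] += 1
--     #accuracies = {}
--     #for length in correct.keys():
--     #    accuracies[length] = float(correct[length])/total[length]
--     return rec_total, rec_correct, prec_total, prec_correct
-- ===== SOURCE B (Python) =====
-- def dep_length(gold_arcs, gold_rels, predicted_arcs, predicted_rels):
--     # pass 1: collect parallel lists of distances and correctness flags
--     rec_distances = []
--     prec_distances = []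
--     corrects = []
--     for sent_idx in range(len(gold_arcs)):
--         gold_arcs_sent = gold_arcs[sent_idx]
--         predicted_arcs_sent = predicted_arcs[sent_idx]
--         for word_idx in range(len(gold_arcs_sent)):
--             gold_arc = int(gold_arcs_sent[word_idx])
--             predicted_arc = int(predicted_arcs_sent[word_idx])
--             rec_distances.append(abs(word_idx + 1 - gold_arc))
--             prec_distances.append(abs(word_idx + 1 - predicted_arc))
--             corrects.append(gold_arc == predicted_arc)
--     # pass 2: aggregate totals by counting, correct-counts by seed-then-increment
--     rec_total = {}
--     for d in rec_distances:
--         rec_total[d] = rec_total.get(d, 0) + 1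
--     prec_total = {}
--     for d in prec_distances:
--         prec_total[d] = prec_total.get(d, 0) + 1
--     rec_correct = {k: 0 for k in rec_total}
--     for d, c in zip(rec_distances, corrects):
--         if c:
--             rec_correct[d] += 1
--     prec_correct = {k: 0 for k in prec_total}
--     for d, c in zip(prec_distances, corrects):
--         if c:
--             prec_correct[d] += 1
--     return rec_total, rec_correct, prec_total, prec_correct
-- ===== Notes on version B (the rewrite author's own statement) =====
-- stated objective: alternative
-- what changed: A's single interleaved loop that branches on key membership and updates all four dicts per word is replaced by a collect-then-aggregate pipeline: one pass gathers parallel lists of recall/precision distances and correctness flags, then totals are built by plain counting and correct-counts by seeding every seen distance with 0 and incrementing over the correct words.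
import Mathlib
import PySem

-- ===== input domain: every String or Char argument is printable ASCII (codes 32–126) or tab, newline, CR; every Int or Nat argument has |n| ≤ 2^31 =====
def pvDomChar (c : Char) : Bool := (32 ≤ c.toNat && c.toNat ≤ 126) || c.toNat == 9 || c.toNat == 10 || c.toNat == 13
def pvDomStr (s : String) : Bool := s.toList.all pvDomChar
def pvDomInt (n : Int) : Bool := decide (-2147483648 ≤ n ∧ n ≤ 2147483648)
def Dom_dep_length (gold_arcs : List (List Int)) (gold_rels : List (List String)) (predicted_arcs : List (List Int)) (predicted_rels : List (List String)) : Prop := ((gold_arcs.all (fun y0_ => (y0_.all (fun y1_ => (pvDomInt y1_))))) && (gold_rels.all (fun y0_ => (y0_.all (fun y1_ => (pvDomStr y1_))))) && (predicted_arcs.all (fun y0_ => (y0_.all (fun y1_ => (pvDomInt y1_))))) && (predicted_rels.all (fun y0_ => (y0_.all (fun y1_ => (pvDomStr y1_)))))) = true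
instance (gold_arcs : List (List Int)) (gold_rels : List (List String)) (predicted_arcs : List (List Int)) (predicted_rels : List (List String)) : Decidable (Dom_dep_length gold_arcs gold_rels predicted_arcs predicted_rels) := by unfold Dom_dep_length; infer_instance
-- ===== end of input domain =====

-- B replaces A's single interleaved dict-update loop by a collect-then-aggregate pipeline
-- (first gather distance/correctness lists, then count totals and seed-then-increment the
-- correct-counts); objective: alternative decomposition, same O(n) cost.

-- ===== PORT A =====
def dep_length (gold_arcs : List (List Int)) (gold_rels : List (List String)) (predicted_arcs : List (List Int)) (predicted_rels : List (List String)) : (List (Int × Int)) × (List (Int × Int)) × (List (Int × Int)) × (List (Int × Int)) :=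
  let st :=
    (PySem.List.pyRange 0 (gold_arcs.length : Int) 1).foldl (fun st sent_idx =>
      let gold_arcs_sent := PySem.List.pyGetD gold_arcs sent_idx []
      let gold_rels_sent := PySem.List.pyGetD gold_rels sent_idx []
      let predicted_arcs_sent := PySem.List.pyGetD predicted_arcs sent_idx []
      let predicted_rels_sent := PySem.List.pyGetD predicted_rels sent_idx []
      (PySem.List.pyRange 0 (gold_arcs_sent.length : Int) 1).foldl (fun st word_idx =>
        let rec_total := st.1
        let rec_correct := st.2.1
        let prec_total := st.2.2.1
        let prec_correct := st.2.2.2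
        let gold_arc := PySem.List.pyGetD gold_arcs_sent word_idx 0
        let _gold_rel := PySem.List.pyGetD gold_rels_sent word_idx ""
        let _predicted_rel := PySem.List.pyGetD predicted_rels_sent word_idx ""
        let predicted_arc := PySem.List.pyGetD predicted_arcs_sent word_idx 0
        let rec_distance := |word_idx + 1 - gold_arc|
        let prec_distance := |word_idx + 1 - predicted_arc|
        let recPair :=
          if rec_correct.contains rec_distance then
            (rec_total.insert rec_distance (rec_total.getD rec_distance 0 + 1),
             if gold_arc == predicted_arc then
               rec_correct.insert rec_distance (rec_correct.getD rec_distance 0 + 1)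
             else rec_correct)
          else
            (rec_total.insert rec_distance 1,
             let c := rec_correct.insert rec_distance 0
             if gold_arc == predicted_arc then c.insert rec_distance (c.getD rec_distance 0 + 1) else c)
        let precPair :=
          if prec_correct.contains prec_distance then
            (prec_total.insert prec_distance (prec_total.getD prec_distance 0 + 1),
             if gold_arc == predicted_arc then
               prec_correct.insert prec_distance (prec_correct.getD prec_distance 0 + 1)
             else prec_correct)
          else
            (prec_total.insert prec_distance 1,
             let c := prec_correct.insert prec_distance 0
             if gold_arc == predicted_arc then c.insert prec_distance (c.getD prec_distance 0 + 1) else c)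
        (recPair.1, recPair.2, precPair.1, precPair.2)) st)
      ((PySem.Dict.empty : PySem.Dict Int Int), (PySem.Dict.empty : PySem.Dict Int Int),
       (PySem.Dict.empty : PySem.Dict Int Int), (PySem.Dict.empty : PySem.Dict Int Int))
  (st.1.items, st.2.1.items, st.2.2.1.items, st.2.2.2.items)

-- ===== PORT B =====
def dep_length_alt (gold_arcs : List (List Int)) (gold_rels : List (List String)) (predicted_arcs : List (List Int)) (predicted_rels : List (List String)) : (List (Int × Int)) × (List (Int × Int)) × (List (Int × Int)) × (List (Int × Int)) :=
  -- pass 1: collect parallel lists of distances and correctness flags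
  let lists :=
    (PySem.List.pyRange 0 (gold_arcs.length : Int) 1).foldl (fun acc sent_idx =>
      let gold_arcs_sent := PySem.List.pyGetD gold_arcs sent_idx []
      let predicted_arcs_sent := PySem.List.pyGetD predicted_arcs sent_idx []
      (PySem.List.pyRange 0 (gold_arcs_sent.length : Int) 1).foldl (fun acc word_idx =>
        let gold_arc := PySem.List.pyGetD gold_arcs_sent word_idx 0
        let predicted_arc := PySem.List.pyGetD predicted_arcs_sent word_idx 0
        (acc.1 ++ [|word_idx + 1 - gold_arc|],
         acc.2.1 ++ [|word_idx + 1 - predicted_arc|],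
         acc.2.2 ++ [gold_arc == predicted_arc])) acc)
      (([] : List Int), ([] : List Int), ([] : List Bool))
  let rec_distances := lists.1
  let prec_distances := lists.2.1
  let corrects := lists.2.2
  -- pass 2: totals by counting, correct-counts by seed-then-increment
  let rec_total := rec_distances.foldl (fun d x => d.insert x (d.getD x 0 + 1)) (PySem.Dict.empty : PySem.Dict Int Int)
  let prec_total := prec_distances.foldl (fun d x => d.insert x (d.getD x 0 + 1)) (PySem.Dict.empty : PySem.Dict Int Int)
  let rec_correct := (rec_distances.zip corrects).foldl
    (fun d p => if p.2 then d.insert p.1 (d.getD p.1 0 + 1) else d)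
    (rec_total.keys.foldl (fun d k => d.insert k 0) (PySem.Dict.empty : PySem.Dict Int Int))
  let prec_correct := (prec_distances.zip corrects).foldl
    (fun d p => if p.2 then d.insert p.1 (d.getD p.1 0 + 1) else d)
    (prec_total.keys.foldl (fun d k => d.insert k 0) (PySem.Dict.empty : PySem.Dict Int Int))
  (rec_total.items, rec_correct.items, prec_total.items, prec_correct.items)

-- ===== PRECONDITION & SPEC =====
-- Pre_ excludes exactly the inputs on which the Python A raises IndexError: a rels/predicted
-- list (or one of its sentences) shorter than the gold_arcs structure it is indexed by.
def Pre_dep_length (gold_arcs : List (List Int)) (gold_rels : List (List String)) (predicted_arcs : List (List Int)) (predicted_rels : List (List String)) : Prop :=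
  gold_arcs.length ≤ gold_rels.length ∧ gold_arcs.length ≤ predicted_arcs.length ∧
  gold_arcs.length ≤ predicted_rels.length ∧
  ∀ i < gold_arcs.length,
    (gold_arcs.getD i []).length ≤ (gold_rels.getD i []).length ∧
    (gold_arcs.getD i []).length ≤ (predicted_arcs.getD i []).length ∧
    (gold_arcs.getD i []).length ≤ (predicted_rels.getD i []).length
instance (gold_arcs : List (List Int)) (gold_rels : List (List String)) (predicted_arcs : List (List Int)) (predicted_rels : List (List String)) : Decidable (Pre_dep_length gold_arcs gold_rels predicted_arcs predicted_rels) := by unfold Pre_dep_length; infer_instance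
def pvWitness_dep_length : List (List Int) × List (List String) × List (List Int) × List (List String) :=
  ([[1, 0], [3]], [["a", "b"], ["c"]], [[1, 2], [3]], [["a", "b"], ["c"]])

def Spec_dep_length (gold_arcs : List (List Int)) (gold_rels : List (List String)) (predicted_arcs : List (List Int)) (predicted_rels : List (List String)) (out : (List (Int × Int)) × (List (Int × Int)) × (List (Int × Int)) × (List (Int × Int))) : Prop := out = dep_length_alt gold_arcs gold_rels predicted_arcs predicted_rels
instance (gold_arcs : List (List Int)) (gold_rels : List (List String)) (predicted_arcs : List (List Int)) (predicted_rels : List (List String)) (out : (List (Int × Int)) × (List (Int × Int)) × (List (Int × Int)) × (List (Int × Int))) : Decidable (Spec_dep_length gold_arcs gold_rels predicted_arcs predicted_rels out) := by unfold Spec_dep_length; infer_instance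

-- ===== CLAIM (what is proved, stated in full; the proofs are below) =====
def Claim_equal_dep_length : Prop := ∀ (gold_arcs : List (List Int)) (gold_rels : List (List String)) (predicted_arcs : List (List Int)) (predicted_rels : List (List String)), Dom_dep_length gold_arcs gold_rels predicted_arcs predicted_rels → Pre_dep_length gold_arcs gold_rels predicted_arcs predicted_rels → Spec_dep_length gold_arcs gold_rels predicted_arcs predicted_rels (dep_length gold_arcs gold_rels predicted_arcs predicted_rels)

-- ===== LEMMAS AND PROOFS =====

-- one word's (recall distance, precision distance, correctness) triple
def pvTriple (g p : List Int) (j : Nat) : Int × Int × Bool :=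
  (|(j : Int) + 1 - g.getD j 0|, |(j : Int) + 1 - p.getD j 0|, g.getD j 0 == p.getD j 0)

-- the flat word stream both programs process
def pvTrips (ga pa : List (List Int)) : List (Int × Int × Bool) :=
  (List.range ga.length).flatMap (fun i =>
    (List.range (ga.getD i []).length).map (pvTriple (ga.getD i []) (pa.getD i [])))

-- A's per-word update on one (total, correct) dict pair
def pvPairStep (tc : PySem.Dict Int Int × PySem.Dict Int Int) (db : Int × Bool) :
    PySem.Dict Int Int × PySem.Dict Int Int :=
  if tc.2.contains db.1 then
    (tc.1.insert db.1 (tc.1.getD db.1 0 + 1),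
     if db.2 then tc.2.insert db.1 (tc.2.getD db.1 0 + 1) else tc.2)
  else
    (tc.1.insert db.1 1,
     let c := tc.2.insert db.1 0
     if db.2 then c.insert db.1 (c.getD db.1 0 + 1) else c)

def pvStepA (st : PySem.Dict Int Int × PySem.Dict Int Int × PySem.Dict Int Int × PySem.Dict Int Int)
    (t : Int × Int × Bool) :
    PySem.Dict Int Int × PySem.Dict Int Int × PySem.Dict Int Int × PySem.Dict Int Int :=
  ((pvPairStep (st.1, st.2.1) (t.1, t.2.2)).1, (pvPairStep (st.1, st.2.1) (t.1, t.2.2)).2,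
   (pvPairStep (st.2.2.1, st.2.2.2) (t.2.1, t.2.2)).1, (pvPairStep (st.2.2.1, st.2.2.2) (t.2.1, t.2.2)).2)

def pvCanon (L : List (Int × Int × Bool)) :
    PySem.Dict Int Int × PySem.Dict Int Int × PySem.Dict Int Int × PySem.Dict Int Int :=
  (((L.map (fun t => (t.1, t.2.2))).foldl pvPairStep (PySem.Dict.empty, PySem.Dict.empty)).1,
   ((L.map (fun t => (t.1, t.2.2))).foldl pvPairStep (PySem.Dict.empty, PySem.Dict.empty)).2,
   ((L.map (fun t => (t.2.1, t.2.2))).foldl pvPairStep (PySem.Dict.empty, PySem.Dict.empty)).1,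
   ((L.map (fun t => (t.2.1, t.2.2))).foldl pvPairStep (PySem.Dict.empty, PySem.Dict.empty)).2)

lemma pv_pyfold {σ : Type} (G : σ → Int → σ) (n : Nat) (s0 : σ) :
    (PySem.List.pyRange 0 (n : Int) 1).foldl G s0 = (List.range n).foldl (fun (s : σ) (j : Nat) => G s (j : Int)) s0 := by
  induction n with
  | zero => simp [PySem.List.pyRange_one_eq_nil le_rfl]
  | succ m ih =>
    have h1 : ((m + 1 : Nat) : Int) = (m : Int) + 1 := by push_cast; ring
    rw [h1, PySem.List.pyRange_one_succ_right (by positivity)]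
    simp only [List.range_succ, List.foldl_append, ih, List.foldl_cons, List.foldl_nil]

lemma pv_foldl_flatMap {α β σ : Type} (l : List α) (g : α → List β) (f : σ → β → σ) (s0 : σ) :
    (l.flatMap g).foldl f s0 = l.foldl (fun s x => (g x).foldl f s) s0 := by
  induction l generalizing s0 with
  | nil => rfl
  | cons x l ih => simp [List.flatMap_cons, List.foldl_append, ih]

lemma pv_depA_eq (ga : List (List Int)) (gr : List (List String)) (pa : List (List Int)) (pr : List (List String)) :
    dep_length ga gr pa pr =
      (let st := (pvTrips ga pa).foldl pvStepA (PySem.Dict.empty, PySem.Dict.empty, PySem.Dict.empty, PySem.Dict.empty)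
       (st.1.items, st.2.1.items, st.2.2.1.items, st.2.2.2.items)) := by
  simp only [dep_length, pvTrips]
  rw [pv_pyfold, pv_foldl_flatMap]
  simp only [PySem.List.pyGetD_natCast]
  refine congrArg (fun st : PySem.Dict Int Int × PySem.Dict Int Int × PySem.Dict Int Int × PySem.Dict Int Int => (st.1.items, st.2.1.items, st.2.2.1.items, st.2.2.2.items)) ?_
  apply PySem.List.foldl_congr_mem
  intro acc i _
  rw [pv_pyfold]
  simp only [PySem.List.pyGetD_natCast]
  rw [List.foldl_map]
  rfl

lemma pv_split (L : List (Int × Int × Bool))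
    (rt rc pt pc : PySem.Dict Int Int) :
    L.foldl pvStepA (rt, rc, pt, pc) =
      (((L.map (fun t => (t.1, t.2.2))).foldl pvPairStep (rt, rc)).1,
       ((L.map (fun t => (t.1, t.2.2))).foldl pvPairStep (rt, rc)).2,
       ((L.map (fun t => (t.2.1, t.2.2))).foldl pvPairStep (pt, pc)).1,
       ((L.map (fun t => (t.2.1, t.2.2))).foldl pvPairStep (pt, pc)).2) := by
  induction L generalizing rt rc pt pc with
  | nil => rfl
  | cons a L ih =>
    simp only [List.foldl_cons, List.map_cons, pvStepA]
    rw [ih]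

def pvCnt (t : PySem.Dict Int Int) (p : Int × Bool) : PySem.Dict Int Int :=
  t.insert p.1 (t.getD p.1 0 + 1)
def pvCor (c : PySem.Dict Int Int) (p : Int × Bool) : PySem.Dict Int Int :=
  c.insert p.1 (c.getD p.1 0 + if p.2 then 1 else 0)
def pvInc (c : PySem.Dict Int Int) (p : Int × Bool) : PySem.Dict Int Int :=
  if p.2 then c.insert p.1 (c.getD p.1 0 + 1) else c

lemma pv_insert_getD_self (c : PySem.Dict Int Int) (d : Int)
    (h : c.contains d = true) (hnd : c.keys.Nodup) : c.insert d (c.getD d 0) = c := by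
  apply PySem.Dict.ext
  rw [PySem.Dict.items_insert_of_contains _ _ h]
  have hmap : ∀ p ∈ c.items, (if (p.1 == d) = true then (d, c.getD d 0) else p) = p := by
    intro p hp
    by_cases hpd : p.1 = d
    · have hv := PySem.Dict.getD_of_mem_items c (k := p.1) (v := p.2) (by simpa using hp) hnd 0
      simp only [hpd, beq_self_eq_true, if_pos]
      rw [hpd] at hv
      rw [hv, ← hpd]
    · simp [hpd]
  rw [List.map_congr_left hmap, List.map_id']

lemma pv_pair_fold (L : List (Int × Bool)) : ∀ (t c : PySem.Dict Int Int),
    c.keys = t.keys → t.keys.Nodup →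
    L.foldl pvPairStep (t, c) = (L.foldl pvCnt t, L.foldl pvCor c) := by
  induction L with
  | nil => intro t c _ _; rfl
  | cons a L ih =>
    intro t c hk hnd
    obtain ⟨d, b⟩ := a
    have hcc : c.contains d = t.contains d := by
      rw [PySem.Dict.contains_eq_decide_mem_keys, PySem.Dict.contains_eq_decide_mem_keys, hk]
    simp only [List.foldl_cons]
    by_cases hd : t.contains d = true
    · have hstep : pvPairStep (t, c) (d, b) = (pvCnt t (d, b), pvCor c (d, b)) := by
        cases b with
        | false =>
          simp only [pvPairStep, pvCnt, pvCor, hcc, hd, if_pos, if_neg, Bool.false_eq_true,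
            if_false, add_zero]
          rw [pv_insert_getD_self c d (by rw [hcc]; exact hd) (hk ▸ hnd)]
        | true => simp [pvPairStep, pvCnt, pvCor, hcc, hd]
      rw [hstep, ih]
      · simp only [pvCnt, pvCor]
        rw [PySem.Dict.keys_insert_of_contains _ _ (by rw [hcc]; exact hd),
            PySem.Dict.keys_insert_of_contains _ _ hd, hk]
      · exact PySem.Dict.nodup_keys_insert _ _ _ hnd
    · have hd' : t.contains d = false := by simpa using hd
      have hcd' : c.contains d = false := by rw [hcc]; exact hd'
      have hstep : pvPairStep (t, c) (d, b) = (pvCnt t (d, b), pvCor c (d, b)) := by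
        cases b with
        | false =>
          simp [pvPairStep, pvCnt, pvCor, hcd', hd', PySem.Dict.getD_of_not_contains _ _ hd',
            PySem.Dict.getD_of_not_contains _ _ hcd']
        | true =>
          simp only [pvPairStep, pvCnt, pvCor, hcd', hd', Bool.false_eq_true, if_false, if_true,
            if_pos, PySem.Dict.getD_insert_self, PySem.Dict.insert_insert_self,
            PySem.Dict.getD_of_not_contains _ _ hd', PySem.Dict.getD_of_not_contains _ _ hcd']
          norm_num
      rw [hstep, ih]
      · simp only [pvCnt, pvCor]
        rw [PySem.Dict.keys_insert_of_not_contains _ _ hcd',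
            PySem.Dict.keys_insert_of_not_contains _ _ hd', hk]
      · exact PySem.Dict.nodup_keys_insert _ _ _ hnd

lemma pv_getD_cor (L : List (Int × Bool)) : ∀ (c : PySem.Dict Int Int) (k : Int),
    (L.foldl pvCor c).getD k 0 = c.getD k 0 + (L.countP (fun p => p.1 == k && p.2) : Int) := by
  induction L with
  | nil => intro c k; simp
  | cons a L ih =>
    intro c k
    obtain ⟨d, b⟩ := a
    simp only [List.foldl_cons, List.countP_cons, ih, pvCor, PySem.Dict.getD_insert]
    by_cases hk : k = d <;> cases b <;> simp [hk] <;> push_cast <;> omega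

lemma pv_getD_inc (L : List (Int × Bool)) : ∀ (c : PySem.Dict Int Int) (k : Int),
    (L.foldl pvInc c).getD k 0 = c.getD k 0 + (L.countP (fun p => p.1 == k && p.2) : Int) := by
  induction L with
  | nil => intro c k; simp
  | cons a L ih =>
    intro c k
    obtain ⟨d, b⟩ := a
    simp only [List.foldl_cons, List.countP_cons, pvInc]
    cases b with
    | false => simp [ih]
    | true =>
      simp only [if_true, ih, PySem.Dict.getD_insert]
      by_cases hk : k = d <;> simp [hk] <;> push_cast <;> omega

lemma pv_keys_inc (L : List (Int × Bool)) : ∀ (c : PySem.Dict Int Int),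
    (∀ p ∈ L, c.contains p.1 = true) → (L.foldl pvInc c).keys = c.keys := by
  induction L with
  | nil => intro c _; rfl
  | cons a L ih =>
    intro c hc
    obtain ⟨d, b⟩ := a
    simp only [List.foldl_cons, pvInc]
    cases b with
    | false => exact ih c (fun p hp => hc p (List.mem_cons_of_mem _ hp))
    | true =>
      simp only [if_true]
      rw [ih _ (fun p hp => by
        rw [PySem.Dict.contains_insert]
        simp [hc p (List.mem_cons_of_mem _ hp)])]
      exact PySem.Dict.keys_insert_of_contains _ _ (hc (d, true) List.mem_cons_self)

lemma pv_stream (L : List (Int × Bool)) :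
    L.foldl pvPairStep (PySem.Dict.empty, PySem.Dict.empty) =
      ((L.map (·.1)).foldl (fun d x => d.insert x (d.getD x 0 + 1)) PySem.Dict.empty,
       L.foldl pvInc
         (((L.map (·.1)).foldl (fun d x => d.insert x (d.getD x 0 + 1)) (PySem.Dict.empty : PySem.Dict Int Int)).keys.foldl
           (fun d k => d.insert k 0) (PySem.Dict.empty : PySem.Dict Int Int))) := by
  rw [pv_pair_fold L _ _ (by rw [PySem.Dict.keys_empty]) (by rw [PySem.Dict.keys_empty]; exact List.nodup_nil)]
  have hcnt : L.foldl pvCnt PySem.Dict.empty = (L.map (·.1)).foldl (fun d x => d.insert x (d.getD x 0 + 1)) PySem.Dict.empty := by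
    rw [List.foldl_map]
    rfl
  have hTkeys : ((L.map (·.1)).foldl (fun d x => d.insert x (d.getD x 0 + 1)) (PySem.Dict.empty : PySem.Dict Int Int)).keys = PySem.Set.ofList (L.map (·.1)) := by
    rw [PySem.Dict.foldl_insert_getD_add_one_eq_counter (L.map (·.1)), PySem.Dict.keys_counter]
  have hKnodup : (PySem.Set.ofList (L.map (·.1))).Nodup := PySem.Set.nodup_ofList _
  have hseeditems : ((PySem.Set.ofList (L.map (·.1))).foldl (fun d k => d.insert k 0) (PySem.Dict.empty : PySem.Dict Int Int)).items
      = (PySem.Set.ofList (L.map (·.1))).map (fun k => (k, (0 : Int))) := by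
    have := PySem.Dict.items_foldl_insert_fresh (PySem.Set.ofList (L.map (·.1)))
      (fun k => k) (fun _ => (0 : Int)) PySem.Dict.empty (fun a _ => PySem.Dict.contains_empty a) (by simpa using hKnodup)
    simpa using this
  have hseedkeys : ((PySem.Set.ofList (L.map (·.1))).foldl (fun d k => d.insert k 0) (PySem.Dict.empty : PySem.Dict Int Int)).keys
      = PySem.Set.ofList (L.map (·.1)) := by
    show ((PySem.Set.ofList (L.map (·.1))).foldl (fun d k => d.insert k 0) (PySem.Dict.empty : PySem.Dict Int Int)).items.map (·.1) = _
    rw [hseeditems, List.map_map]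
    simp [Function.comp_def]
  have hseednodup : ((PySem.Set.ofList (L.map (·.1))).foldl (fun d k => d.insert k 0) (PySem.Dict.empty : PySem.Dict Int Int)).keys.Nodup := by
    rw [hseedkeys]; exact hKnodup
  have hseedgetD : ∀ k : Int, ((PySem.Set.ofList (L.map (·.1))).foldl (fun d k => d.insert k 0) (PySem.Dict.empty : PySem.Dict Int Int)).getD k 0 = 0 := by
    intro k
    by_cases hk : k ∈ PySem.Set.ofList (L.map (·.1))
    · have hmem : (k, (0 : Int)) ∈ ((PySem.Set.ofList (L.map (·.1))).foldl (fun d k => d.insert k 0) (PySem.Dict.empty : PySem.Dict Int Int)).items := by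
        rw [hseeditems]
        exact List.mem_map_of_mem hk
      exact PySem.Dict.getD_of_mem_items _ hmem hseednodup 0
    · apply PySem.Dict.getD_of_not_contains
      rw [PySem.Dict.contains_eq_decide_mem_keys, hseedkeys]
      simpa using hk
  have hcorkeys : (L.foldl pvCor PySem.Dict.empty).keys = PySem.Set.ofList (L.map (·.1)) := by
    show (L.foldl (fun (d : PySem.Dict Int Int) (p : Int × Bool) => d.insert p.1 (d.getD p.1 0 + if p.2 then 1 else 0)) PySem.Dict.empty).keys = _
    rw [PySem.Dict.keys_foldl_insert_key L (fun p => p.1) _ _, PySem.Dict.keys_empty, PySem.Set.update_nil_left]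
  have hcornodup : (L.foldl pvCor PySem.Dict.empty).keys.Nodup := by
    rw [hcorkeys]; exact PySem.Set.nodup_ofList _
  have hinckeys := pv_keys_inc L
    ((PySem.Set.ofList (L.map (·.1))).foldl (fun d k => d.insert k 0) (PySem.Dict.empty : PySem.Dict Int Int))
    (fun p hp => by
      rw [PySem.Dict.contains_eq_decide_mem_keys, hseedkeys]
      have : p.1 ∈ L.map (·.1) := List.mem_map_of_mem hp
      simp [PySem.Set.mem_ofList, this])
  refine congrArg₂ Prod.mk hcnt ?_
  rw [hTkeys]
  apply PySem.Dict.ext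
  rw [PySem.Dict.items_eq_map_keys _ hcornodup 0,
      PySem.Dict.items_eq_map_keys _ (by rw [hinckeys]; exact hseednodup) 0,
      hcorkeys, hinckeys, hseedkeys]
  apply List.map_congr_left
  intro k _
  rw [pv_getD_cor, pv_getD_inc, hseedgetD k, PySem.Dict.getD_empty]

def pvCollect (acc : List Int × List Int × List Bool) (t : Int × Int × Bool) : List Int × List Int × List Bool :=
  (acc.1 ++ [t.1], acc.2.1 ++ [t.2.1], acc.2.2 ++ [t.2.2])

lemma pv_collect_eq (L : List (Int × Int × Bool)) : ∀ (a b : List Int) (cs : List Bool),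
    L.foldl pvCollect (a, b, cs) = (a ++ L.map (·.1), b ++ L.map (·.2.1), cs ++ L.map (·.2.2)) := by
  induction L with
  | nil => intro a b cs; simp [pvCollect]
  | cons t L ih => intro a b cs; simp [pvCollect, ih]

lemma pv_firstpass (ga pa : List (List Int)) :
    (PySem.List.pyRange 0 (ga.length : Int) 1).foldl (fun acc sent_idx =>
      let gold_arcs_sent := PySem.List.pyGetD ga sent_idx []
      let predicted_arcs_sent := PySem.List.pyGetD pa sent_idx []
      (PySem.List.pyRange 0 (gold_arcs_sent.length : Int) 1).foldl (fun acc word_idx =>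
        let gold_arc := PySem.List.pyGetD gold_arcs_sent word_idx 0
        let predicted_arc := PySem.List.pyGetD predicted_arcs_sent word_idx 0
        (acc.1 ++ [|word_idx + 1 - gold_arc|],
         acc.2.1 ++ [|word_idx + 1 - predicted_arc|],
         acc.2.2 ++ [gold_arc == predicted_arc])) acc)
      (([] : List Int), ([] : List Int), ([] : List Bool))
    = ((pvTrips ga pa).map (·.1), (pvTrips ga pa).map (·.2.1), (pvTrips ga pa).map (·.2.2)) := by
  have h2 : (pvTrips ga pa).foldl pvCollect (([] : List Int), ([] : List Int), ([] : List Bool))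
      = ((pvTrips ga pa).map (·.1), (pvTrips ga pa).map (·.2.1), (pvTrips ga pa).map (·.2.2)) := by
    rw [pv_collect_eq]; simp
  rw [← h2]
  simp only [pvTrips]
  rw [pv_pyfold, pv_foldl_flatMap]
  simp only [PySem.List.pyGetD_natCast]
  apply PySem.List.foldl_congr_mem
  intro acc i _
  rw [pv_pyfold]
  simp only [PySem.List.pyGetD_natCast]
  rw [List.foldl_map]
  rfl

lemma pv_depB_eq (ga : List (List Int)) (gr : List (List String)) (pa : List (List Int)) (pr : List (List String)) :
    dep_length_alt ga gr pa pr =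
      (let st := pvCanon (pvTrips ga pa)
       (st.1.items, st.2.1.items, st.2.2.1.items, st.2.2.2.items)) := by
  simp only [dep_length_alt]
  rw [pv_firstpass]
  simp only [pvCanon]
  rw [pv_stream, pv_stream]
  simp only [List.map_map, Function.comp_def, List.zip_map']
  rfl

-- ===== VERDICT (by name: the statement is the Claim_ definition above) =====
theorem dep_length_spec : Claim_equal_dep_length := by
  intro ga gr pa pr _ _
  unfold Spec_dep_length
  rw [pv_depA_eq, pv_depB_eq]
  simp only [pvCanon]
  rw [pv_split]
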